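-- pv_equiv track=rewrite | github.com/FraunhIEE-UniKassel-PowSysStability/powfacpy | src/powfacpy/string_manipulation.py | replace_between_characters
-- ===== SOURCE A (Python) =====
-- def replace_between_characters(char1: str,
--                                char2: str,
--                                replacement: str,
--                                original: str):
--     """Replace between 'char1' and 'char2' in 'original' with 'replacement'.
--
--     Example:
--       Calling
--         powfacpy.PFStringManipulation.replace_between_characters(
--           '.',
--           '\\',
--           '\\',
--           'username.IntUser\\pow.facpy.\\powfacpy.tests.IntPrj\\Network Model.IntPrjfolder\\Network Data.IntPrjfolder\\test_base_interface\\Grid.ElmNet\\Terminal HV 1.ElmTerm'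
--       would give the output:
--         'username\\pow.facpy\\powfacpy.tests\\Network Model\\Network Data\\test_base_interface\\Grid\\Terminal HV 1'
--       Note the behavior when there are several '.' in between '\\'
--       -> then the replacement starts after the last '.'
--     """
--     new_string = ""
--     is_after_char_1 = False
--     string_between_char_1_occurrences = ""
--     for c in original:
--         if c == char1:
--             is_after_char_1 = True
--             new_string += string_between_char_1_occurrences
--             string_between_char_1_occurrences = ""
--         elif c == char2:
--             if is_after_char_1:
--                 new_string += replacement
--             else:
--                 new_string += c
--             string_between_char_1_occurrences = ""
--             is_after_char_1 = False
--         if is_after_char_1: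
--             string_between_char_1_occurrences += c
--         elif not c == char2:
--             new_string += c
--     return new_string
-- ===== SOURCE B (Python) =====
-- def replace_between_characters(char1, char2, replacement, original):
--     out = []
--     emitted = 0    # length of the prefix of 'original' already handled
--     opened = None  # index of the most recent opening delimiter, if unclosed
--     for i, c in enumerate(original):
--         if c == char1:
--             opened = i
--         elif c == char2 and opened is not None:
--             out.append(original[emitted:opened])
--             out.append(replacement)
--             emitted = i + 1
--             opened = None
--     out.append(original[emitted:] if opened is None else original[emitted:opened])
--     return ''.join(out)
-- ===== Notes on version B (the rewrite author's own statement) =====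
-- stated objective: alternative
-- what changed: Replaced A's per-character accumulation (boolean flag plus a growing buffer string, appending each character to the output one by one) by a single pass that tracks only two indices (prefix already emitted, position of the last unmatched opening delimiter) and emits whole slices at delimiter events, joined once at the end.
import Mathlib
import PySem

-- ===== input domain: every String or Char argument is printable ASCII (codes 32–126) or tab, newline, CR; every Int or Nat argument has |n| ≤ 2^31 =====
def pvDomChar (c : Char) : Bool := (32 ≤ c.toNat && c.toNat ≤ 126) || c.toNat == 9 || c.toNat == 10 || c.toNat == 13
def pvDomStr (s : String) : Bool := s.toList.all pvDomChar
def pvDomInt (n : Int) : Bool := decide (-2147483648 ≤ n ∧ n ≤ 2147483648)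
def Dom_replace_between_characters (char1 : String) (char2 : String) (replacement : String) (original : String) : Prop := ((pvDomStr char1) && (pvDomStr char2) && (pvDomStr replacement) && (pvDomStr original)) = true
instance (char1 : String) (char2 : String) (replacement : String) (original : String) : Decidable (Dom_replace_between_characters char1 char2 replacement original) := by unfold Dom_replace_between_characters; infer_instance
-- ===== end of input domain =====

-- B replaces A's per-character accumulation (boolean flag + growing buffer string) by a
-- single pass that tracks only two indices and emits whole slices, joined once at the end.

-- ===== PORT A =====
-- one iteration of A's for-loop: state = (new_string, is_after_char_1, string_between_char_1_occurrences)
def pvAStep (cs1 cs2 repl : List Char) (st : List Char × Bool × List Char) (c : Char) :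
    List Char × Bool × List Char :=
  let st1 :=
    if [c] = cs1 then (st.1 ++ st.2.2, true, ([] : List Char))
    else if [c] = cs2 then
      ((if st.2.1 then st.1 ++ repl else st.1 ++ [c]), false, ([] : List Char))
    else st
  if st1.2.1 then (st1.1, st1.2.1, st1.2.2 ++ [c])
  else if ¬ [c] = cs2 then (st1.1 ++ [c], st1.2.1, st1.2.2)
  else st1

def replace_between_characters (char1 : String) (char2 : String) (replacement : String) (original : String) : String :=
  String.ofList
    ((original.toList.foldl (pvAStep char1.toList char2.toList replacement.toList)
      ([], false, [])).1)

-- ===== PORT B =====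
-- body of B's for-loop: state = (out, emitted, opened), ic = (i, c) from enumerate
def pvBStep (cs1 cs2 repl orig : List Char)
    (st : List (List Char) × Int × Option Int) (ic : Int × Char) :
    List (List Char) × Int × Option Int :=
  if [ic.2] = cs1 then (st.1, st.2.1, some ic.1)
  else if [ic.2] = cs2 then
    match st.2.2 with
    | some j => (st.1 ++ [PySem.List.slice orig (some st.2.1) (some j), repl], ic.1 + 1, none)
    | none => st
  else st

-- B's final line: append the remaining slice and join
def pvBFin (orig : List Char) (st : List (List Char) × Int × Option Int) : List Char :=
  (st.1 ++ [match st.2.2 with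
            | none => PySem.List.slice orig (some st.2.1) none
            | some j => PySem.List.slice orig (some st.2.1) (some j)]).flatten

def replace_between_characters_alt (char1 : String) (char2 : String) (replacement : String) (original : String) : String :=
  String.ofList
    (pvBFin original.toList
      ((PySem.List.enumerate original.toList 0).foldl
        (pvBStep char1.toList char2.toList replacement.toList original.toList)
        ([], 0, none)))

-- ===== PRECONDITION & SPEC =====
def Spec_replace_between_characters (char1 : String) (char2 : String) (replacement : String) (original : String) (out : String) : Prop := out = replace_between_characters_alt char1 char2 replacement original
instance (char1 : String) (char2 : String) (replacement : String) (original : String) (out : String) : Decidable (Spec_replace_between_characters char1 char2 replacement original out) := by unfold Spec_replace_between_characters; infer_instance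

-- ===== CLAIM (what is proved, stated in full; the proofs are below) =====
def Claim_equal_replace_between_characters : Prop := ∀ (char1 : String) (char2 : String) (replacement : String) (original : String), Dom_replace_between_characters char1 char2 replacement original → Spec_replace_between_characters char1 char2 replacement original (replace_between_characters char1 char2 replacement original)

-- ===== LEMMAS AND PROOFS =====

-- extending a contiguous slice by the character at its right end
theorem pv_take_snoc (orig : List Char) (e k : Nat) (hk : k < orig.length) (he : e ≤ k) :
    (orig.drop e).take (k - e) ++ [orig[k]] = (orig.drop e).take (k + 1 - e) := by
  have h1 : k + 1 - e = (k - e) + 1 := by omega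
  rw [h1, List.take_succ]
  have h2 : (orig.drop e)[k - e]? = some orig[k] := by
    rw [List.getElem?_drop]
    rw [List.getElem?_eq_getElem (by omega)]
    congr 1
    congr 1
    omega
  rw [h2]
  rfl

-- gluing two adjacent contiguous slices
theorem pv_take_chain (orig : List Char) (e j k : Nat) (he : e ≤ j) (hj : j ≤ k) :
    (orig.drop e).take (j - e) ++ (orig.drop j).take (k - j) = (orig.drop e).take (k - e) := by
  have h : k - e = (j - e) + (k - j) := by omega
  rw [h, List.take_add]
  congr 1
  have h2 : (orig.drop e).drop (j - e) = orig.drop j := by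
    rw [List.drop_drop]
    congr 1
    omega
  rw [h2]

-- the invariant run: A's fold from any reachable state equals B's finished value.
-- In the flag=false conjunct, A's new_string is out.flatten ++ original[e:k];
-- in the flag=true conjunct it is out.flatten ++ original[e:j] and the buffer is original[j:k].
theorem pv_run (cs1 cs2 repl orig : List Char) (l : List Char) :
    ∀ (k : Nat), l = orig.drop k →
    ((∀ (out : List (List Char)) (e : Nat), e ≤ k →
      (l.foldl (pvAStep cs1 cs2 repl)
        (out.flatten ++ (orig.drop e).take (k - e), false, [])).1
        = pvBFin orig ((PySem.List.enumerate l (k : Int)).foldl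
            (pvBStep cs1 cs2 repl orig) (out, (e : Int), none)))
    ∧ (∀ (out : List (List Char)) (e j : Nat), e ≤ j → j ≤ k →
      (l.foldl (pvAStep cs1 cs2 repl)
        (out.flatten ++ (orig.drop e).take (j - e), true, (orig.drop j).take (k - j))).1
        = pvBFin orig ((PySem.List.enumerate l (k : Int)).foldl
            (pvBStep cs1 cs2 repl orig) (out, (e : Int), some (j : Int))))) := by
  induction l with
  | nil =>
    intro k hk
    have hlen : orig.length ≤ k := by
      by_contra hc
      push_neg at hc
      have := congrArg List.length hk
      simp at this
      omega
    constructor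
    · intro out e he
      simp only [List.foldl_nil, PySem.List.enumerate_nil]
      rw [List.take_of_length_le (by simp; omega)]
      simp [pvBFin, PySem.List.slice_from_natCast]
    · intro out e j he hj
      simp only [List.foldl_nil, PySem.List.enumerate_nil]
      simp [pvBFin, PySem.List.slice_natCast]
  | cons c rest ih =>
    intro k hk
    have hklt : k < orig.length := by
      by_contra hc
      push_neg at hc
      rw [List.drop_eq_nil_of_le hc] at hk
      exact List.cons_ne_nil _ _ hk
    have hdk := List.drop_eq_getElem_cons hklt
    rw [hdk] at hk
    have hc1 : orig[k] = c := by
      exact ((List.cons.injEq _ _ _ _).mp hk.symm).1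
    have hrest : rest = orig.drop (k + 1) := by
      exact ((List.cons.injEq _ _ _ _).mp hk.symm).2.symm
    have hcast : ((k : Int) + 1) = (((k + 1 : Nat)) : Int) := by push_cast; ring
    obtain ⟨ihA, ihB⟩ := ih (k + 1) hrest
    have htake1 : (orig.drop k).take (k + 1 - k) = [c] := by
      rw [hdk]
      rw [show k + 1 - k = 1 from by omega, List.take_succ_cons, List.take_zero, hc1]
    constructor
    · -- flag = false, opened = none
      intro out e he
      rw [PySem.List.enumerate_cons, List.foldl_cons, List.foldl_cons]
      by_cases h1 : [c] = cs1
      · have hA : pvAStep cs1 cs2 repl (out.flatten ++ (orig.drop e).take (k - e), false, []) c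
            = (out.flatten ++ (orig.drop e).take (k - e), true, [c]) := by
          simp [pvAStep, h1]
        have hB : pvBStep cs1 cs2 repl orig (out, (e : Int), none) ((k : Int), c)
            = (out, (e : Int), some (k : Int)) := by
          simp [pvBStep, h1]
        rw [hA, hB, hcast]
        have hth := ihB out e k he (by omega)
        rw [htake1] at hth
        exact hth
      · have hstA : pvAStep cs1 cs2 repl (out.flatten ++ (orig.drop e).take (k - e), false, []) c
            = (out.flatten ++ (orig.drop e).take (k - e) ++ [c], false, []) := by
          by_cases h2 : [c] = cs2
          · simp only [pvAStep]
            rw [if_neg h1, if_pos h2]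
            simp [h2]
          · simp only [pvAStep]
            rw [if_neg h1, if_neg h2]
            simp [h2]
        have hstB : pvBStep cs1 cs2 repl orig (out, (e : Int), none) ((k : Int), c)
            = (out, (e : Int), none) := by
          by_cases h2 : [c] = cs2
          · simp only [pvBStep]
            rw [if_neg h1, if_pos h2]
          · simp only [pvBStep]
            rw [if_neg h1, if_neg h2]
        rw [hstA, hstB, hcast, List.append_assoc, ← hc1,
          pv_take_snoc orig e k hklt he]
        exact ihA out e (by omega)
    · -- flag = true, opened = some j
      intro out e j he hj
      rw [PySem.List.enumerate_cons, List.foldl_cons, List.foldl_cons]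
      by_cases h1 : [c] = cs1
      · have hA : pvAStep cs1 cs2 repl
            (out.flatten ++ (orig.drop e).take (j - e), true, (orig.drop j).take (k - j)) c
            = (out.flatten ++ (orig.drop e).take (j - e) ++ (orig.drop j).take (k - j), true, [c]) := by
          simp [pvAStep, h1]
        have hB : pvBStep cs1 cs2 repl orig (out, (e : Int), some (j : Int)) ((k : Int), c)
            = (out, (e : Int), some (k : Int)) := by
          simp [pvBStep, h1]
        rw [hA, hB, hcast, List.append_assoc, pv_take_chain orig e j k he hj]
        have hth := ihB out e k (by omega) (by omega)
        rw [htake1] at hth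
        exact hth
      · by_cases h2 : [c] = cs2
        · have hA : pvAStep cs1 cs2 repl
              (out.flatten ++ (orig.drop e).take (j - e), true, (orig.drop j).take (k - j)) c
              = (out.flatten ++ (orig.drop e).take (j - e) ++ repl, false, []) := by
            simp only [pvAStep]
            rw [if_neg h1, if_pos h2]
            simp [h2]
          have hB : pvBStep cs1 cs2 repl orig (out, (e : Int), some (j : Int)) ((k : Int), c)
              = (out ++ [PySem.List.slice orig (some (e : Int)) (some (j : Int)), repl],
                 (k : Int) + 1, none) := by
            simp only [pvBStep]
            rw [if_neg h1, if_pos h2]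
          rw [hA, hB, hcast, PySem.List.slice_natCast]
          have hth := ihA (out ++ [(orig.drop e).take (j - e), repl]) (k + 1) (by omega)
          rw [show (orig.drop (k + 1)).take (k + 1 - (k + 1)) = [] from by simp] at hth
          simp only [List.flatten_append, List.flatten_cons, List.flatten_nil,
            List.append_nil, List.append_assoc] at hth ⊢
          exact hth
        · have hA : pvAStep cs1 cs2 repl
              (out.flatten ++ (orig.drop e).take (j - e), true, (orig.drop j).take (k - j)) c
              = (out.flatten ++ (orig.drop e).take (j - e), true,
                 (orig.drop j).take (k - j) ++ [c]) := by
            simp only [pvAStep]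
            rw [if_neg h1, if_neg h2]
            simp
          have hB : pvBStep cs1 cs2 repl orig (out, (e : Int), some (j : Int)) ((k : Int), c)
              = (out, (e : Int), some (j : Int)) := by
            simp only [pvBStep]
            rw [if_neg h1, if_neg h2]
          rw [hA, hB, hcast, ← hc1, pv_take_snoc orig j k hklt hj]
          exact ihB out e j he (by omega)

-- ===== VERDICT (by name: the statement is the Claim_ definition above) =====
theorem replace_between_characters_spec : Claim_equal_replace_between_characters := by
  intro char1 char2 replacement original _
  unfold Spec_replace_between_characters
  unfold replace_between_characters replace_between_characters_alt
  have h := (pv_run char1.toList char2.toList replacement.toList original.toList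
    original.toList 0 (by simp)).1 [] 0 (le_refl 0)
  simp only [List.flatten_nil, List.drop_zero, Nat.sub_zero, List.take_zero,
    List.nil_append, Nat.cast_zero] at h
  exact congrArg String.ofList h
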